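-- pv_equiv track=rewrite | github.com/marfepa/App-analisis | analisis_riesgo/config.py | obtener_nivel_riesgo_combinado
-- ===== SOURCE A (Python) =====
-- def obtener_nivel_riesgo_combinado(nivel_asistencia: str,
--                                    nivel_rendimiento: str) -> str:
--     """
--     Combina niveles de riesgo de asistencia y rendimiento.
--     Usa el nivel m치s alto (m치s grave).
--
--     Args:
--         nivel_asistencia: Nivel de riesgo de asistencia
--         nivel_rendimiento: Nivel de riesgo de rendimiento
--
--     Returns:
--         Nivel de riesgo combinado
--     """
--     orden = {'OPTIMO': 0, 'ALERTA': 1, 'MEDIO': 2, 'ALTO': 3}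
--
--     codigo_asist = orden.get(nivel_asistencia, 0)
--     codigo_rend = orden.get(nivel_rendimiento, 0)
--
--     codigo_max = max(codigo_asist, codigo_rend)
--
--     for nivel, cod in orden.items():
--         if cod == codigo_max:
--             return nivel
--
--     return 'OPTIMO'
-- ===== SOURCE B (Python) =====
-- def obtener_nivel_riesgo_combinado(nivel_asistencia: str,
--                                    nivel_rendimiento: str) -> str:
--     # Scan severities from most severe down; the first level matched by either
--     # input is the combined level. Unknown strings match nothing -> 'OPTIMO',
--     # same as the original's .get(..., 0) default.
--     for nivel in ('ALTO', 'MEDIO', 'ALERTA'):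
--         if nivel_asistencia == nivel or nivel_rendimiento == nivel:
--             return nivel
--     return 'OPTIMO'
-- ===== Notes on version B (the rewrite author's own statement) =====
-- stated objective: simpler
-- what changed: Drops the severity-code ranking entirely: instead of mapping both names to numeric codes, taking max and reverse-looking-up the name, B scans the severities from most severe downward and returns the first level that either input equals, falling through to 'OPTIMO'.
import Mathlib
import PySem

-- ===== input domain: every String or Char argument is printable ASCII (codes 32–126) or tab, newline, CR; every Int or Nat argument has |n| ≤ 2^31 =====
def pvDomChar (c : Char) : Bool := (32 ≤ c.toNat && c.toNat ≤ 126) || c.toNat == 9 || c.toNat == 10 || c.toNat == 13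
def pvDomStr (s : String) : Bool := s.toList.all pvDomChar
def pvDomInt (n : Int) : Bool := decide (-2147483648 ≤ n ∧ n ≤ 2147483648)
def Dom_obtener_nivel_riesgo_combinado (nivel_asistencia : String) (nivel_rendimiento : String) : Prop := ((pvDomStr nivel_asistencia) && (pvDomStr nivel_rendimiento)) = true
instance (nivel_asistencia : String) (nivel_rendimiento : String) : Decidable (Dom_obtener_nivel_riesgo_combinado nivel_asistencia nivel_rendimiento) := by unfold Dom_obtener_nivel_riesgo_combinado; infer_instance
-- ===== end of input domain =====

set_option maxHeartbeats 1000000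

-- B replaces the code/max/reverse-lookup scheme by a descending-severity cascade that returns the first level either input matches; objective: simpler.

-- ===== PORT A =====
-- the 'for nivel, cod in orden.items(): if cod == codigo_max: return nivel' loop, with early return
def pvFindNivel : List (String × Int) → Int → Option String
  | [], _ => none
  | (n, c) :: rest, cm => if c == cm then some n else pvFindNivel rest cm

def obtener_nivel_riesgo_combinado (nivel_asistencia : String) (nivel_rendimiento : String) : String :=
  let orden : PySem.Dict String Int :=
    ((((PySem.Dict.empty).insert "OPTIMO" 0).insert "ALERTA" 1).insert "MEDIO" 2).insert "ALTO" 3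
  let codigo_asist := orden.getD nivel_asistencia 0
  let codigo_rend := orden.getD nivel_rendimiento 0
  let codigo_max := max codigo_asist codigo_rend
  match pvFindNivel orden.items codigo_max with
  | some n => n
  | none => "OPTIMO"

-- ===== PORT B =====
-- the 'for nivel in ('ALTO','MEDIO','ALERTA'): if a == nivel or b == nivel: return nivel' loop
def pvCascade (a b : String) : List String → String
  | [] => "OPTIMO"
  | n :: rest => if a == n || b == n then n else pvCascade a b rest

def obtener_nivel_riesgo_combinado_alt (nivel_asistencia : String) (nivel_rendimiento : String) : String :=
  pvCascade nivel_asistencia nivel_rendimiento ["ALTO", "MEDIO", "ALERTA"]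

-- ===== PRECONDITION & SPEC =====
def Spec_obtener_nivel_riesgo_combinado (nivel_asistencia : String) (nivel_rendimiento : String) (out : String) : Prop := out = obtener_nivel_riesgo_combinado_alt nivel_asistencia nivel_rendimiento
instance (nivel_asistencia : String) (nivel_rendimiento : String) (out : String) : Decidable (Spec_obtener_nivel_riesgo_combinado nivel_asistencia nivel_rendimiento out) := by unfold Spec_obtener_nivel_riesgo_combinado; infer_instance

-- ===== CLAIM =====
def Claim_equal_obtener_nivel_riesgo_combinado : Prop := ∀ (nivel_asistencia : String) (nivel_rendimiento : String), Dom_obtener_nivel_riesgo_combinado nivel_asistencia nivel_rendimiento → Spec_obtener_nivel_riesgo_combinado nivel_asistencia nivel_rendimiento (obtener_nivel_riesgo_combinado nivel_asistencia nivel_rendimiento)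

-- ===== LEMMAS AND PROOFS =====

-- Both sides depend only on which of the four canonical names each input is; enumerate 5 × 5 cases.
theorem pv_case (s : String) :
    s = "OPTIMO" ∨ s = "ALERTA" ∨ s = "MEDIO" ∨ s = "ALTO" ∨
    (s ≠ "OPTIMO" ∧ s ≠ "ALERTA" ∧ s ≠ "MEDIO" ∧ s ≠ "ALTO") := by
  by_cases h1 : s = "OPTIMO" <;> by_cases h2 : s = "ALERTA" <;>
    by_cases h3 : s = "MEDIO" <;> by_cases h4 : s = "ALTO" <;> simp_all

theorem pv_find_none (s : String) (h1 : s ≠ "OPTIMO") (h2 : s ≠ "ALERTA")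
    (h3 : s ≠ "MEDIO") (h4 : s ≠ "ALTO") :
    List.find? (fun p => p.1 == s)
      [("OPTIMO", (0 : Int)), ("ALERTA", 1), ("MEDIO", 2), ("ALTO", 3)] = none := by
  rw [List.find?_eq_none]
  intro p hp
  simp only [List.mem_cons, List.not_mem_nil, or_false] at hp
  rcases hp with rfl | rfl | rfl | rfl <;> simp <;>
    first
      | exact fun h => h1 h.symm
      | exact fun h => h2 h.symm
      | exact fun h => h3 h.symm
      | exact fun h => h4 h.symm

-- ===== VERDICT =====
theorem obtener_nivel_riesgo_combinado_spec : Claim_equal_obtener_nivel_riesgo_combinado := by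
  intro a b _
  show obtener_nivel_riesgo_combinado a b = obtener_nivel_riesgo_combinado_alt a b
  rcases pv_case a with ha | ha | ha | ha | ⟨ha1, ha2, ha3, ha4⟩ <;>
    rcases pv_case b with hb | hb | hb | hb | ⟨hb1, hb2, hb3, hb4⟩ <;>
    first
      | (subst_vars; decide)
      | (simp_all [obtener_nivel_riesgo_combinado, obtener_nivel_riesgo_combinado_alt,
            pvFindNivel, pvCascade, PySem.Dict.getD, PySem.Dict.get?, PySem.Dict.insert,
            PySem.Dict.empty, pv_find_none])
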